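-- pv_equiv track=rewrite | github.com/ureChanger/1day-1Algorithm | 2020.12.02 - 25/moreSpicy(heapq).py | solution
-- ===== SOURCE A (Python) =====
-- def solution(scoville, K):
--     #문제 이해
--     #추상화: 해당 공식의 값이 K이상이 될 때까지 계산
--     #계획하기: heapq를 이용해 scoville의 원소를 차례대로 계산
--     #heapq: heapq.heappush(h,(num)), heapq.heappop(h)
--     import heapq
--     heapq.heapify(scoville)
--
--     answer = 0
--
--     def getScovilleFigure(food1, food2):
--         return food1 + (food2*2)
--
--     while scoville[0] < K:
--         if len(scoville) <= 1:
--             return -1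
--
--         heapq.heappush(scoville,(getScovilleFigure(heapq.heappop(scoville), heapq.heappop(scoville))))
--         answer += 1
--
--     return answer
-- ===== SOURCE B (Python) =====
-- def solution(scoville, K):
--     # Keep a min-first sorted list; repeatedly pop the two smallest and
--     # reinsert the mix in order (insert after existing equals, as insort would).
--     # Does not mutate the argument, unlike A, which heapifies/pops scoville
--     # in place; the return value is the same.
--     s = sorted(scoville)
--     answer = 0
--     while s and s[0] < K:
--         if len(s) <= 1:
--             return -1
--         food1 = s.pop(0)
--         food2 = s.pop(0)
--         new = food1 + food2 * 2
--         i = 0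
--         while i < len(s) and s[i] <= new:
--             i += 1
--         s.insert(i, new)
--         answer += 1
--     return answer
-- ===== Notes on version B (the rewrite author's own statement) =====
-- stated objective: alternative
-- what changed: Replaces the binary heap with a sorted list kept in order: the two smallest foods are popped from the front and the mix reinserted at its ordered position, maintaining total order instead of heap order; equivalence is about the return value (A heapifies/pops scoville in place, B leaves it untouched).
import Mathlib
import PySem

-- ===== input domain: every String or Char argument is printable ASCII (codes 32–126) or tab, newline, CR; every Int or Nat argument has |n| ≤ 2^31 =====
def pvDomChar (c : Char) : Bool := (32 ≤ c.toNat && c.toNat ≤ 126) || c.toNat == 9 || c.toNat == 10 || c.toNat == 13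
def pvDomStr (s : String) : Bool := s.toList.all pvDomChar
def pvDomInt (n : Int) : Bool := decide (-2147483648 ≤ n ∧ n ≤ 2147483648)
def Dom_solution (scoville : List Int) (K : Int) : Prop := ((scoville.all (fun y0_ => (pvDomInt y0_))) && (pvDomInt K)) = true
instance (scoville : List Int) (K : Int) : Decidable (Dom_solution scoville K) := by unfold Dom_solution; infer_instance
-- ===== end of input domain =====

-- B replaces the heap with a sorted list maintained by ordered insertion; equivalence is
-- about the RETURN VALUE only (Python A heapifies/pops scoville in place, B does not mutate it).

-- ===== PORT A =====
-- heapq is a library call PySem does not cover; it is modeled by its contract on the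
-- observables of this program: heappop yields the minimum (PySem.List.min?) and removes one
-- occurrence of it, heappush adds the element, heapify only rearranges. This is exact for
-- the returned value, since the program only ever looks at the heap's minimum and length.
def getScovilleFigure (food1 : Int) (food2 : Int) : Int := food1 + (food2 * 2)

-- fuel makes the while-loop structurally recursive; fuel = length + 1 always suffices,
-- since every iteration shortens the heap by one and the loop stops at length ≤ 1.
def solutionGo (fuel : Nat) (h : List Int) (K : Int) (answer : Int) : Int :=
  match fuel with
  | 0 => answer
  | fuel + 1 =>
    match PySem.List.min? h (fun x => x) with
    | none => answer   -- empty heap: Python raises IndexError here; excluded by Pre_solution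
    | some food1 =>
      if food1 < K then
        if h.length ≤ 1 then -1
        else
          match PySem.List.min? ((PySem.List.remove? h food1).getD []) (fun x => x) with
          | none => answer   -- unreachable: the popped heap still has ≥ 1 element here
          | some food2 =>
            solutionGo fuel
              ((PySem.List.remove? ((PySem.List.remove? h food1).getD []) food2).getD []
                ++ [getScovilleFigure food1 food2]) K (answer + 1)
      else answer

def solution (scoville : List Int) (K : Int) : Int :=
  solutionGo (scoville.length + 1) scoville K 0

-- ===== PORT B =====
-- ordered insertion into a sorted list: insert after existing equals (as insort would).
def insortR (s : List Int) (v : Int) : List Int :=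
  match s with
  | [] => [v]
  | x :: xs => if v < x then v :: x :: xs else x :: insortR xs v

-- fuel as above: fuel = length + 1 suffices, the loop shortens the list every iteration.
def solutionAltGo (fuel : Nat) (s : List Int) (K : Int) (answer : Int) : Int :=
  match fuel with
  | 0 => answer
  | fuel + 1 =>
    match s with
    | [] => answer                            -- while-guard: s empty → loop ends
    | x :: rest =>
      if x < K then
        if (x :: rest).length ≤ 1 then -1
        else
          match rest with
          | [] => -1                           -- unreachable (length > 1)
          | food2 :: rest2 =>
            solutionAltGo fuel (insortR rest2 (x + food2 * 2)) K (answer + 1)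
      else answer

def solution_alt (scoville : List Int) (K : Int) : Int :=
  solutionAltGo (scoville.length + 1) (PySem.List.sorted scoville (fun x => x) false) K 0

-- ===== PRECONDITION & SPEC =====
-- Pre_ excludes only the empty list, on which A raises IndexError at scoville[0].
def Pre_solution (scoville : List Int) (K : Int) : Prop := scoville ≠ []
instance (scoville : List Int) (K : Int) : Decidable (Pre_solution scoville K) := by
  unfold Pre_solution; infer_instance
def pvWitness_solution : List Int × Int := ([1, 2, 9], 7)

def Spec_solution (scoville : List Int) (K : Int) (out : Int) : Prop := out = solution_alt scoville K
instance (scoville : List Int) (K : Int) (out : Int) : Decidable (Spec_solution scoville K out) := by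
  unfold Spec_solution; infer_instance

-- ===== CLAIM (what is proved, stated in full; the proofs are below) =====
def Claim_equal_solution : Prop := ∀ (scoville : List Int) (K : Int), Dom_solution scoville K → Pre_solution scoville K → Spec_solution scoville K (solution scoville K)

-- ===== LEMMAS AND PROOFS =====

theorem insortR_perm (s : List Int) (v : Int) : (insortR s v).Perm (v :: s) := by
  induction s with
  | nil => exact List.Perm.refl _
  | cons x xs ih =>
    simp only [insortR]
    split
    · exact List.Perm.refl _
    · exact (ih.cons x).trans (List.Perm.swap v x xs)

theorem insortR_pairwise (s : List Int) (v : Int)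
    (hs : s.Pairwise (· ≤ ·)) : (insortR s v).Pairwise (· ≤ ·) := by
  induction s with
  | nil => simp [insortR]
  | cons x xs ih =>
    rw [List.pairwise_cons] at hs
    simp only [insortR]
    split
    · rename_i hlt
      refine List.pairwise_cons.mpr ⟨?_, List.pairwise_cons.mpr hs⟩
      intro a ha
      rcases List.mem_cons.mp ha with rfl | ha
      · exact le_of_lt hlt
      · exact le_of_lt (lt_of_lt_of_le hlt (hs.1 a ha))
    · rename_i hge
      refine List.pairwise_cons.mpr ⟨?_, ih hs.2⟩
      intro a ha
      rcases List.mem_cons.mp (((insortR_perm xs v).mem_iff).mp ha) with heq | ha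
      · omega
      · exact hs.1 a ha

-- the head of a sorted list is min? of any permutation of it
theorem min?_perm_sorted {h : List Int} {x : Int} {rest : List Int}
    (hp : h.Perm (x :: rest)) (hs : (x :: rest).Pairwise (· ≤ ·)) :
    PySem.List.min? h (fun y => y) = some x := by
  have hne : h ≠ [] := by
    intro e; subst e; exact (List.cons_ne_nil x rest) hp.nil_eq.symm
  rcases hm : PySem.List.min? h (fun y => y) with _ | m
  · exact absurd ((PySem.List.min?_eq_none_iff h _).mp hm) hne
  · have hmem : m ∈ h := PySem.List.min?_mem hm
    have hmin : ∀ y ∈ h, m ≤ y := fun y hy => PySem.List.min?_isMin hm y hy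
    have hxh : x ∈ h := hp.mem_iff.mpr List.mem_cons_self
    have hms : m ∈ x :: rest := hp.mem_iff.mp hmem
    rw [List.pairwise_cons] at hs
    have hxm : x ≤ m := by
      rcases List.mem_cons.mp hms with rfl | hmr
      · exact le_refl _
      · exact hs.1 m hmr
    rw [le_antisymm (hmin x hxh) hxm]

theorem go_eq (n : Nat) : ∀ (h s : List Int) (K answer : Int), h.length < n →
    h.Perm s → s.Pairwise (· ≤ ·) → h ≠ [] →
    solutionGo n h K answer = solutionAltGo n s K answer := by
  induction n with
  | zero => intro h s K answer hlen; omega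
  | succ n ih =>
    intro h s K answer hlen hp hs hne
    match s, hs with
    | [], _ => exact absurd hp.eq_nil hne
    | x :: rest, hs =>
      have hmin := min?_perm_sorted hp hs
      simp only [solutionGo, solutionAltGo, hmin]
      by_cases hK : x < K
      · simp only [if_pos hK]
        have hlenhs : h.length = rest.length + 1 := by simpa using hp.length_eq
        cases rest with
        | nil =>
          have h1 : h.length ≤ 1 := by simp only [List.length_nil] at hlenhs; omega
          simp [h1]
        | cons food2 rest2 =>
          have hgt : ¬ h.length ≤ 1 := by simp [hlenhs]
          simp only [if_neg hgt, List.length_cons]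
          have hxh : x ∈ h := hp.mem_iff.mpr List.mem_cons_self
          rw [PySem.List.remove?_eq_some_erase h x hxh]
          have hp1 : (h.erase x).Perm (food2 :: rest2) := by
            have := hp.erase x; simpa using this
          have hs1 : (food2 :: rest2).Pairwise (· ≤ ·) := (List.pairwise_cons.mp hs).2
          have hmin2 := min?_perm_sorted hp1 hs1
          simp only [Option.getD_some, hmin2]
          have hfh : food2 ∈ h.erase x := hp1.mem_iff.mpr List.mem_cons_self
          rw [PySem.List.remove?_eq_some_erase (h.erase x) food2 hfh]
          simp only [Option.getD_some]
          have hp2 : ((h.erase x).erase food2).Perm rest2 := by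
            have := hp1.erase food2; simpa using this
          have hp3 : (((h.erase x).erase food2) ++ [getScovilleFigure x food2]).Perm
              (insortR rest2 (x + food2 * 2)) := by
            refine List.Perm.trans ?_ (insortR_perm rest2 (x + food2 * 2)).symm
            have hg : getScovilleFigure x food2 = x + food2 * 2 := rfl
            rw [hg]
            exact (List.perm_append_singleton _ _).trans (hp2.cons _)
          have hs3 : (insortR rest2 (x + food2 * 2)).Pairwise (· ≤ ·) :=
            insortR_pairwise rest2 _ (List.pairwise_cons.mp hs1).2
          have hne3 : ((h.erase x).erase food2) ++ [getScovilleFigure x food2] ≠ [] := by simp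
          have hlen3 : (((h.erase x).erase food2) ++ [getScovilleFigure x food2]).length < n := by
            have l1 : (h.erase x).length = h.length - 1 := List.length_erase_of_mem hxh
            have l2 : ((h.erase x).erase food2).length = (h.erase x).length - 1 :=
              List.length_erase_of_mem hfh
            simp only [List.length_append, List.length_cons, List.length_nil, l2, l1]
            omega
          exact ih _ _ K (answer + 1) hlen3 hp3 hs3 hne3
      · simp [hK]

-- ===== VERDICT (by name: the statement is the Claim_ definition above) =====
theorem solution_spec : Claim_equal_solution := by
  intro scoville K _hdom hpre
  unfold Spec_solution solution solution_alt
  exact go_eq (scoville.length + 1) scoville _ K 0 (by omega)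
    (PySem.List.sorted_perm scoville _ false).symm
    (by simpa using PySem.List.sorted_pairwise scoville (fun x => x))
    hpre
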